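-- pv_equiv track=rewrite | github.com/seonghyeon0312/CodingTest | 프로그래머스/2/84512. 모음 사전/모음 사전.py | solution
-- ===== SOURCE A (Python) =====
-- def cal(offset, idx):
--     numbers = [625,125,25,5,1]
--     sumNum = 0
--     for i in range(idx,5):
--         sumNum+=(numbers[i]*offset)
--
--     return sumNum+1
--
-- def solution(word):
--     answer = 0
--     diction = {
--         "A":0,
--         "E":1,
--         "I":2,
--         "O":3,
--         "U":4
--     }
--
--     for i in range(len(word)):
--         answer+=cal(diction[word[i]],i)
--     return answer
-- ===== SOURCE B (Python) =====
-- def solution(word):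
--     diction = {"A": 0, "E": 1, "I": 2, "O": 3, "U": 4}
--     answer = len(word)
--     mult = 781
--     for c in word:
--         answer += diction[c] * mult
--         mult //= 5
--     return answer
-- ===== Notes on version B (the rewrite author's own statement) =====
-- stated objective: simpler
-- what changed: Replaced the per-character nested-summation helper cal (which re-sums a tail of the powers-of-5 table for every index) by a single forward pass that keeps one running place-value multiplier, halving the code and removing the inner loop.
import Mathlib
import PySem

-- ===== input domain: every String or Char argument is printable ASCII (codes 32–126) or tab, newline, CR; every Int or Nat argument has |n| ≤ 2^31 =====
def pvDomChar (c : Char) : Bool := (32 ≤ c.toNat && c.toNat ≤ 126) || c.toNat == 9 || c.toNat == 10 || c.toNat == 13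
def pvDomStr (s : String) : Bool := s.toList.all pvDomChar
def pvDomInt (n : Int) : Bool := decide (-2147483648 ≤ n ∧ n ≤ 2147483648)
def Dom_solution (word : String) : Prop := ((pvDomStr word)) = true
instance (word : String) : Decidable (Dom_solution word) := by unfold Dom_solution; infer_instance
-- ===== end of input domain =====

-- B replaces the nested-summation helper by one pass with a running place-value multiplier; same values on all vowel-only words.

-- the module-level vowel→offset dict both Python versions build literally
def diction : PySem.Dict Char Int :=
  PySem.Dict.ofList [('A', 0), ('E', 1), ('I', 2), ('O', 3), ('U', 4)]

-- ===== PORT A =====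
-- cal(offset, idx): numbers[i] is always in range for the indices solution passes (0 ≤ idx, i < 5),
-- so pyGetD is exact here.
def cal (offset idx : Int) : Int :=
  (PySem.List.pyRange idx 5 1).foldl
    (fun sumNum i => sumNum + PySem.List.pyGetD ([625, 125, 25, 5, 1] : List Int) i 0 * offset) 0
  + 1

-- diction[word[i]] raises KeyError on non-vowels: those inputs are excluded by Pre_solution, so getD 0 is exact;
-- word[i] with 0 ≤ i < len(word) is exactly word.toList[i], so pyGetD with a default is exact.
def solution (word : String) : Int :=
  (PySem.List.pyRange 0 (PySem.Str.len word) 1).foldl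
    (fun answer i => answer + cal (diction.getD (PySem.List.pyGetD word.toList i ' ') 0) i) 0

-- ===== PORT B =====
def solution_alt (word : String) : Int :=
  (word.toList.foldl
    (fun (p : Int × Int) c => (p.1 + diction.getD c 0 * p.2, PySem.Int.floordiv p.2 5))
    (PySem.Str.len word, 781)).1

-- ===== PRECONDITION & SPEC =====
-- Pre_ excludes exactly the words containing a non-vowel character, on which Python A raises KeyError.
def Pre_solution (word : String) : Prop :=
  (word.toList.all (fun c => c ∈ (['A', 'E', 'I', 'O', 'U'] : List Char))) = true
instance (word : String) : Decidable (Pre_solution word) := by unfold Pre_solution; infer_instance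
def pvWitness_solution : String := "EIO"

def Spec_solution (word : String) (out : Int) : Prop := out = solution_alt word
instance (word : String) (out : Int) : Decidable (Spec_solution word out) := by unfold Spec_solution; infer_instance

-- ===== CLAIM (what is proved, stated in full; the proofs are below) =====
def Claim_equal_solution : Prop := ∀ (word : String), Dom_solution word → Pre_solution word → Spec_solution word (solution word)

-- ===== LEMMAS AND PROOFS =====

-- the place-value multiplier at index k: sum of the tail numbers[k:] of A's table
def sfun : Nat → Int
  | 0 => 781
  | 1 => 156
  | 2 => 31
  | 3 => 6
  | 4 => 1
  | _ => 0

lemma sfun_succ (k : Nat) : sfun (k + 1) = PySem.Int.floordiv (sfun k) 5 := by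
  match k with
  | 0 | 1 | 2 | 3 | 4 => decide
  | n + 5 => simp [sfun]

lemma cal_eq (off : Int) (k : Nat) : cal off (k : Int) = sfun k * off + 1 := by
  unfold cal
  rw [PySem.List.foldl_add _ (fun i => PySem.List.pyGetD ([625, 125, 25, 5, 1] : List Int) i 0 * off) 0,
    List.sum_map_mul_right]
  have h : ((PySem.List.pyRange (k : Int) 5 1).map
      (fun i => PySem.List.pyGetD ([625, 125, 25, 5, 1] : List Int) i 0)).sum = sfun k := by
    match k with
    | 0 | 1 | 2 | 3 | 4 => decide
    | n + 5 =>
      rw [PySem.List.pyRange_one_eq_nil (by push_cast; omega)]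
      simp [sfun]
  rw [h]; ring

-- A's index fold equals a fold over enumerate of the character list
lemma foldl_idx (f : Int → Char → Int → Int) (ws : List Char) :
    ∀ (k : Nat) (acc : Int), k ≤ ws.length →
      (PySem.List.pyRange (k : Int) (ws.length : Int) 1).foldl
          (fun a i => f a (PySem.List.pyGetD ws i ' ') i) acc
        = (PySem.List.enumerate (ws.drop k) (k : Int)).foldl (fun a p => f a p.2 p.1) acc := by
  intro k
  induction hn : ws.length - k generalizing k with
  | zero =>
    intro acc hk
    have hk' : k = ws.length := by omega
    subst hk'
    rw [PySem.List.pyRange_one_eq_nil (by omega), List.drop_length]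
    simp [PySem.List.enumerate]
  | succ n ih =>
    intro acc hk
    have hlt : k < ws.length := by omega
    rw [PySem.List.pyRange_one_cons (by exact_mod_cast hlt)]
    have hdrop : ws.drop k = ws[k] :: ws.drop (k + 1) := List.drop_eq_getElem_cons hlt
    rw [hdrop, PySem.List.enumerate_cons]
    simp only [List.foldl_cons]
    have hget : PySem.List.pyGetD ws (k : Int) ' ' = ws[k] := by
      simp [PySem.List.pyGetD_natCast, List.getD_eq_getElem?_getD, List.getElem?_eq_getElem hlt]
    rw [hget]
    have := ih (k + 1) (by omega) (f acc ws[k] (k : Int)) (by omega)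
    push_cast at this ⊢
    exact this

-- the core invariant: A's enumerate fold from index k equals B's fold with multiplier sfun k
lemma main_inv (cs : List Char) :
    ∀ (k : Nat) (acc : Int),
      (PySem.List.enumerate cs (k : Int)).foldl
          (fun a p => a + cal (diction.getD p.2 0) p.1) acc
        = (cs.foldl
            (fun (p : Int × Int) c => (p.1 + diction.getD c 0 * p.2, PySem.Int.floordiv p.2 5))
            (acc + cs.length, sfun k)).1 := by
  induction cs with
  | nil => intro k acc; simp [PySem.List.enumerate]
  | cons c cs ih =>
    intro k acc
    rw [PySem.List.enumerate_cons]
    simp only [List.foldl_cons]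
    have h1 : ((k : Int) + 1) = ((k + 1 : Nat) : Int) := by push_cast; ring
    rw [cal_eq (diction.getD c 0) k, h1, ih (k + 1) (acc + (sfun k * diction.getD c 0 + 1))]
    have h2 : (acc + (sfun k * diction.getD c 0 + 1) + (cs.length : Int), sfun (k + 1))
        = (acc + ((c :: cs).length : Int) + diction.getD c 0 * sfun k,
           PySem.Int.floordiv (sfun k) 5) := by
      rw [← sfun_succ]
      simp only [List.length_cons]
      congr 1
      push_cast
      ring
    rw [h2]

-- ===== VERDICT (by name: the statement is the Claim_ definition above) =====
theorem solution_spec : Claim_equal_solution := by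
  intro word _ _
  unfold Spec_solution solution solution_alt
  have hl : PySem.Str.len word = (word.toList.length : Int) := PySem.Str.len_eq word
  have h := foldl_idx (fun a c i => a + cal (diction.getD c 0) i) word.toList 0 0 (by omega)
  push_cast at h
  rw [hl, h]
  simpa using main_inv word.toList 0 0
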